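-- pv_equiv track=rewrite | github.com/cortega26/Exercises_and_Problems | reverseArrayInGroups.py | reverseInGroups
-- ===== SOURCE A (Python) =====
-- def reverseInGroups(arr, N, K):
--     """
--     Given an array arr[] of positive integers of size N. Reverse every
--     sub-array group of size K.
--     """
--
--     subs = N // K
--     if N % K != 0:
--         subs += 1
--     solution = []
--     for i in range(subs):
--         solution += arr[K * i : (K * i) + K][::-1]
--     return solution
-- ===== SOURCE B (Python) =====
-- def reverseInGroups(arr, N, K):
--     # Reverse each K-sized group in place with two-pointer swaps on a copied prefix.
--     subs = -(-N // K)              # ceil(N / K); K == 0 raises ZeroDivisionError, as in A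
--     res = list(arr[0 : max(subs, 0) * K])
--     for start in range(0, len(res), K):
--         lo = start
--         hi = min(start + K, len(res)) - 1
--         while lo < hi:
--             res[lo], res[hi] = res[hi], res[lo]
--             lo += 1
--             hi -= 1
--     return res
-- ===== Notes on version B (the rewrite author's own statement) =====
-- stated objective: alternative
-- what changed: Instead of concatenating reversed slices group by group, B computes the group count by ceiling division, copies the touched prefix once, and reverses each group in place with a two-pointer swap loop.
-- outside the precondition, e.g. on reverseInGroups([1, 2, 3], -3, -1): A returns [2, 1], B returns []
import Mathlib
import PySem

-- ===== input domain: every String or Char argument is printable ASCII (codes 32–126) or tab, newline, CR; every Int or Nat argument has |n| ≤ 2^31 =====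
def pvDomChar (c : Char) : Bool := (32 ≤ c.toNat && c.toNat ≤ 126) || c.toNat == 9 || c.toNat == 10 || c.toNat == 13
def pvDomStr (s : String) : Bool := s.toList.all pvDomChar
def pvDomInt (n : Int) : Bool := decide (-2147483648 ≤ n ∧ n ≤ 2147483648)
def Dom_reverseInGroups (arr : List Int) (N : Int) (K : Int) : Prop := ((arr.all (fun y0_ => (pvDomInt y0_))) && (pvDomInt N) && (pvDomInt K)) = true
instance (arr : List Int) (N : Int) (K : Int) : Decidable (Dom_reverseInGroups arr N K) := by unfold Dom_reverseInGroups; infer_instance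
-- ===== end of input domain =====

-- B replaces A's slice-and-concatenate group reversal by a one-shot prefix copy plus
-- in-place two-pointer swap reversal of each group (alternative decomposition, same cost).


-- ===== PORT A =====
-- arr[K*i : K*i+K][::-1] is ported as the reverse of the slice (PySem.List.slice?_none_none_neg_one)
def reverseInGroups (arr : List Int) (N : Int) (K : Int) : List Int :=
  let subs0 := PySem.Int.floordiv N K
  let subs := if PySem.Int.mod N K ≠ 0 then subs0 + 1 else subs0
  (PySem.List.pyRange 0 subs 1).foldl
    (fun solution i =>
      solution ++ (PySem.List.slice arr (some (K * i)) (some (K * i + K))).reverse) []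

-- ===== PORT B =====
-- the while-loop 'while lo < hi: swap res[lo], res[hi]; lo += 1; hi -= 1'
-- (indices are always in range when the loop body runs, so pyGetD/pySetD are exact here)
def swapLoop (res : List Int) (lo hi : Int) : List Int :=
  if _h : lo < hi then
    let x := PySem.List.pyGetD res lo 0
    let y := PySem.List.pyGetD res hi 0
    swapLoop (PySem.List.pySetD (PySem.List.pySetD res lo y) hi x) (lo + 1) (hi - 1)
  else res
termination_by (hi - lo).toNat
decreasing_by omega

def reverseInGroups_alt (arr : List Int) (N : Int) (K : Int) : List Int :=
  let subs := -(PySem.Int.floordiv (-N) K)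
  let res := PySem.List.slice arr (some 0) (some (max subs 0 * K))
  (PySem.List.pyRange 0 (res.length : Int) K).foldl
    (fun res start =>
      swapLoop res start (min (start + K) ((res.length : Int)) - 1)) res

-- ===== PRECONDITION & SPEC =====
-- Pre_ excludes K = 0, where both programs raise ZeroDivisionError, and the corner
-- K < 0 with N < 0, where A's negative-index slice arithmetic returns accidental
-- leftovers (e.g. [2, 1]) outside the function's stated purpose of reversing K-sized
-- groups; for K < 0 with 0 <= N both programs return [] and that is kept inside Pre_.
def Pre_reverseInGroups (arr : List Int) (N : Int) (K : Int) : Prop := 1 ≤ K ∨ (K ≤ -1 ∧ 0 ≤ N)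
instance (arr : List Int) (N : Int) (K : Int) : Decidable (Pre_reverseInGroups arr N K) := by unfold Pre_reverseInGroups; infer_instance
def pvWitness_reverseInGroups : List Int × Int × Int := ([1, 2, 3, 4, 5], 5, 2)

def Spec_reverseInGroups (arr : List Int) (N : Int) (K : Int) (out : List Int) : Prop := out = reverseInGroups_alt arr N K
instance (arr : List Int) (N : Int) (K : Int) (out : List Int) : Decidable (Spec_reverseInGroups arr N K out) := by unfold Spec_reverseInGroups; infer_instance

-- ===== CLAIM (what is proved, stated in full; the proofs are below) =====
def Claim_equal_reverseInGroups : Prop := ∀ (arr : List Int) (N : Int) (K : Int), Dom_reverseInGroups arr N K → Pre_reverseInGroups arr N K → Spec_reverseInGroups arr N K (reverseInGroups arr N K)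

-- ===== LEMMAS AND PROOFS =====

-- reference form: reverse each k-chunk of xs in order
def chunkRev (k : Nat) (xs : List Int) : List Int :=
  if _h : xs = [] ∨ k = 0 then [] else (xs.take k).reverse ++ chunkRev k (xs.drop k)
termination_by xs.length
decreasing_by
  have h1 : xs ≠ [] ∧ k ≠ 0 := by tauto
  have h2 : 0 < xs.length := List.length_pos_iff.mpr h1.1
  have h3 : 0 < k := Nat.pos_of_ne_zero h1.2
  simp only [List.length_drop]; omega

lemma chunkRev_nil (k : Nat) : chunkRev k [] = [] := by
  rw [chunkRev]; simp

-- A's incremented floor division is ceiling division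
lemma subsA_eq (N K : Int) (hK : 1 ≤ K) :
    (if PySem.Int.mod N K ≠ 0 then PySem.Int.floordiv N K + 1 else PySem.Int.floordiv N K)
      = -(PySem.Int.floordiv (-N) K) := by
  have h0 : (0:Int) < K := by omega
  have hd := PySem.Int.floordiv_mul_add_mod N K
  have hr0 : 0 ≤ PySem.Int.mod N K := PySem.Int.mod_nonneg N h0
  have hr1 : PySem.Int.mod N K < K := PySem.Int.mod_lt N h0
  symm
  rw [PySem.Int.neg_floordiv_neg_eq_iff_of_pos h0]
  have e1 : (PySem.Int.floordiv N K + 1 - 1) * K = PySem.Int.floordiv N K * K := by ring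
  have e2 : (PySem.Int.floordiv N K + 1) * K = PySem.Int.floordiv N K * K + K := by ring
  have e3 : (PySem.Int.floordiv N K - 1) * K = PySem.Int.floordiv N K * K - K := by ring
  split_ifs with h
  · exact ⟨by rw [e1]; omega, by rw [e2]; omega⟩
  · exact ⟨by rw [e3]; omega, by omega⟩

-- cons/nil forms of range with a general positive step
lemma pyRange_pos_cons (a b s : Int) (hs : 0 < s) (hab : a < b) :
    PySem.List.pyRange a b s = a :: PySem.List.pyRange (a + s) b s := by
  rw [PySem.List.pyRange_of_pos _ _ hs, PySem.List.pyRange_of_pos _ _ hs]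
  have hx : (0:Int) ≤ b - a - 1 := by omega
  have hq0 : 0 ≤ (b - a - 1) / s := Int.ediv_nonneg hx (le_of_lt hs)
  have h1 : (b - a + s - 1) / s = (b - a - 1) / s + 1 := by
    have h := Int.add_mul_ediv_right (b - a - 1) 1 (show s ≠ 0 by omega)
    have e : b - a + s - 1 = b - a - 1 + 1 * s := by ring
    rw [e, h]
  have hmain : (if a < b then ((b - a + s - 1) / s).toNat else 0)
      = (if a + s < b then ((b - (a + s) + s - 1) / s).toNat else 0) + 1 := by
    rw [if_pos hab, h1]
    by_cases h2 : a + s < b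
    · rw [if_pos h2]
      have e : b - (a + s) + s - 1 = b - a - 1 := by ring
      rw [e]; omega
    · rw [if_neg h2]
      have e : (b - a - 1) / s = 0 := Int.ediv_eq_zero_of_lt hx (by omega)
      omega
  rw [hmain, List.range_succ_eq_map]
  simp only [List.map_cons, List.map_map]
  congr 1
  · simp
  · apply List.map_congr_left
    intro k _
    simp [Function.comp]; ring

lemma pyRange_pos_nil (a b s : Int) (hs : 0 < s) (hab : b ≤ a) :
    PySem.List.pyRange a b s = [] := by
  rw [PySem.List.pyRange_of_pos _ _ hs, if_neg (by omega)]
  simp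

lemma swapLoop_step (res : List Int) (lo hi : Int) (h : lo < hi) :
    swapLoop res lo hi
      = swapLoop (PySem.List.pySetD (PySem.List.pySetD res lo (PySem.List.pyGetD res hi 0))
          hi (PySem.List.pyGetD res lo 0)) (lo + 1) (hi - 1) := by
  rw [swapLoop, dif_pos h]

lemma swapLoop_stop (res : List Int) (lo hi : Int) (h : ¬ lo < hi) :
    swapLoop res lo hi = res := by
  rw [swapLoop, dif_neg h]

lemma set_append_right (l1 l2 : List Int) (n : Nat) (v : Int) :
    (l1 ++ l2).set (l1.length + n) v = l1 ++ l2.set n v := by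
  induction l1 with
  | nil => simp
  | cons x xs ih =>
    show (x :: (xs ++ l2)).set (xs.length + 1 + n) v = x :: (xs ++ l2.set n v)
    have h : xs.length + 1 + n = (xs.length + n) + 1 := by omega
    rw [h, List.set_cons_succ, ih]

lemma getD_append_right (l1 l2 : List Int) (n : Nat) (h : n < l2.length) :
    PySem.List.pyGetD (l1 ++ l2) ((l1.length : Int) + n) 0 = l2[n] := by
  rw [PySem.List.pyGetD_eq_getElem _ _ (by positivity) (by simp; omega)]
  have e : ((l1.length : Int) + n).toNat = l1.length + n := by omega
  simp only [e]
  rw [List.getElem_append_right (by omega)]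
  congr 1; omega

lemma setD_append_right (l1 l2 : List Int) (n : Nat) (v : Int) :
    PySem.List.pySetD (l1 ++ l2) ((l1.length : Int) + n) v = l1 ++ l2.set n v := by
  rw [PySem.List.pySetD_of_nonneg _ _ (by positivity)]
  have e : ((l1.length : Int) + n).toNat = l1.length + n := by omega
  rw [e, set_append_right]

-- the two-pointer loop reverses exactly the designated segment
theorem swapLoop_spec_aux : ∀ (n : Nat) (mid pre post : List Int), mid.length = n →
    swapLoop (pre ++ mid ++ post) (pre.length : Int) ((pre.length : Int) + mid.length - 1)
      = pre ++ mid.reverse ++ post := by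
  intro n
  induction n using Nat.strong_induction_on with
  | _ n ih =>
    intro mid pre post hlen
    rcases mid with _ | ⟨a, ms⟩
    · rw [swapLoop_stop _ _ _ (by simp)]; simp
    · rcases List.eq_nil_or_concat ms with h | ⟨ms', b, rfl⟩
      · subst h
        rw [swapLoop_stop _ _ _ (by simp)]
        simp
      · simp only [List.concat_eq_append] at hlen ⊢
        have hhi : ((pre.length : Int) + ((a :: (ms' ++ [b])).length : Int) - 1)
            = (pre.length : Int) + ((ms'.length + 1 : Nat) : Int) := by
          simp only [List.length_cons, List.length_append, List.length_nil]
          push_cast; omega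
        have hres : pre ++ (a :: (ms' ++ [b])) ++ post = pre ++ (a :: (ms' ++ b :: post)) := by
          simp
        rw [hhi, hres]
        rw [swapLoop_step _ _ _ (by push_cast; omega)]
        have g1 : PySem.List.pyGetD (pre ++ a :: (ms' ++ b :: post)) (pre.length : Int) 0 = a := by
          simpa using getD_append_right pre (a :: (ms' ++ b :: post)) 0 (by simp)
        have g2 : PySem.List.pyGetD (pre ++ a :: (ms' ++ b :: post))
            ((pre.length : Int) + ((ms'.length + 1 : Nat) : Int)) 0 = b := by
          rw [getD_append_right pre (a :: (ms' ++ b :: post)) (ms'.length + 1) (by simp)]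
          rw [List.getElem_cons_succ, List.getElem_append_right (by omega)]
          simp
        rw [g1, g2]
        have s1 : PySem.List.pySetD (pre ++ a :: (ms' ++ b :: post)) (pre.length : Int) b
            = pre ++ b :: (ms' ++ b :: post) := by
          simpa using setD_append_right pre (a :: (ms' ++ b :: post)) 0 b
        rw [s1]
        have hset : (ms' ++ b :: post).set ms'.length a = ms' ++ a :: post := by
          simpa using set_append_right ms' (b :: post) 0 a
        have s2 : PySem.List.pySetD (pre ++ b :: (ms' ++ b :: post))
            ((pre.length : Int) + ((ms'.length + 1 : Nat) : Int)) a
            = pre ++ b :: (ms' ++ a :: post) := by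
          rw [setD_append_right pre _ (ms'.length + 1) a, List.set_cons_succ, hset]
        rw [s2]
        have e2 : pre ++ (b :: (ms' ++ a :: post)) = (pre ++ [b]) ++ ms' ++ (a :: post) := by simp
        have e3 : ((pre.length : Int) + 1) = (((pre ++ [b]).length : Nat) : Int) := by
          simp only [List.length_append, List.length_cons, List.length_nil]
          push_cast; omega
        have e4 : ((pre.length : Int) + ((ms'.length + 1 : Nat) : Int) - 1)
            = (((pre ++ [b]).length : Nat) : Int) + ((ms'.length : Nat) : Int) - 1 := by
          simp only [List.length_append, List.length_cons, List.length_nil]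
          push_cast; omega
        rw [e2, e3, e4]
        rw [ih ms'.length (by simp only [List.length_cons, List.length_append, List.length_nil] at hlen; omega) ms' (pre ++ [b]) (a :: post) rfl]
        simp

-- A-side: concatenating the reversed slices is chunkRev of the touched prefix
lemma Aside : ∀ (s : Nat) (k : Nat), 0 < k → ∀ (arr : List Int),
    (List.range s).flatMap (fun i => ((arr.drop (k * i)).take k).reverse)
      = chunkRev k (arr.take (s * k)) := by
  intro s
  induction s with
  | zero => intro k hk arr; simp [chunkRev_nil]
  | succ s ih =>
    intro k hk arr
    by_cases ha : arr = []
    · subst ha; simp [chunkRev_nil]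
    · rw [List.range_succ_eq_map]
      simp only [List.flatMap_cons, List.flatMap_map]
      have hfun : (fun (i : Nat) => ((arr.drop (k * (i + 1))).take k).reverse)
          = (fun (i : Nat) => (((arr.drop k).drop (k * i)).take k).reverse) := by
        funext i
        rw [List.drop_drop]
        congr 2
        ring
      rw [hfun, ih k hk (arr.drop k)]
      have hm : min k ((s + 1) * k) = k := Nat.min_eq_left (Nat.le_mul_of_pos_left k (Nat.succ_pos s))
      have hsub : (s + 1) * k - k = s * k := by rw [Nat.succ_mul]; omega
      have hne : (s + 1) * k ≠ 0 := Nat.mul_ne_zero (Nat.succ_ne_zero s) (by omega)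
      have hR : chunkRev k (arr.take ((s + 1) * k))
          = (arr.take k).reverse ++ chunkRev k ((arr.drop k).take (s * k)) := by
        rw [chunkRev, dif_neg (by
          intro hcon
          rcases hcon with hcon | hcon
          · rcases List.take_eq_nil_iff.mp hcon with h | h
            · exact hne h
            · exact ha h
          · omega)]
        rw [List.take_take, List.drop_take, hm, hsub]
      rw [hR]
      simp

-- B-side: folding the per-group two-pointer reversal is chunkRev
lemma Bside : ∀ (n : Nat) (todo done : List Int) (K : Int), 1 ≤ K → todo.length = n →
    (PySem.List.pyRange (done.length : Int) ((done.length : Int) + (todo.length : Int)) K).foldl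
        (fun res start => swapLoop res start (min (start + K) ((res.length : Int)) - 1))
        (done ++ todo)
      = done ++ chunkRev K.toNat todo := by
  intro n
  induction n using Nat.strong_induction_on with
  | _ n ih =>
    intro todo done K hK hlen
    by_cases h0 : todo = []
    · subst h0
      rw [pyRange_pos_nil _ _ _ (by omega) (by simp)]
      simp [chunkRev_nil]
    · have hlt : 0 < todo.length := List.length_pos_iff.mpr h0
      rw [pyRange_pos_cons _ _ _ (by omega) (by omega), List.foldl_cons]
      -- the first group: c elements, c = min K.toNat todo.length
      set c := min K.toNat todo.length with hc
      have hcle : c ≤ todo.length := by omega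
      have hcpos : 0 < c := by omega
      have hlen2 : (((done ++ todo).length : Nat) : Int)
          = (done.length : Int) + (todo.length : Int) := by
        push_cast [List.length_append]; ring
      have hmin : min ((done.length : Int) + K) (((done ++ todo).length : Nat) : Int)
          = (done.length : Int) + ((c : Nat) : Int) := by
        rw [hlen2]; omega
      rw [hmin]
      have hdecomp : todo = todo.take c ++ todo.drop c := (List.take_append_drop c todo).symm
      have hmidlen : (todo.take c).length = c := by
        rw [List.length_take]; omega
      -- apply the segment-reversal spec
      have hspec := swapLoop_spec_aux (todo.take c).length (todo.take c) done (todo.drop c) rfl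
      rw [hmidlen] at hspec
      rw [show done ++ todo = done ++ todo.take c ++ todo.drop c from by
            rw [List.append_assoc, ← hdecomp]]
      rw [show ((done.length : Int) + ((c : Nat) : Int) - 1)
            = ((done.length : Int) + ((c : Nat) : Int) - 1) from rfl]
      rw [hspec]
      by_cases hbig : K.toNat < todo.length
      · -- full first group; recurse on the rest
        have hck : c = K.toNat := by omega
        have hlen3 : (done ++ (todo.take c).reverse).length = done.length + c := by
          simp [hmidlen]
        have hb1 : (done.length : Int) + K
            = (((done ++ (todo.take c).reverse).length : Nat) : Int) := by
          rw [hlen3]; push_cast; omega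
        have hb2 : (done.length : Int) + (todo.length : Int)
            = (((done ++ (todo.take c).reverse).length : Nat) : Int)
              + ((todo.drop c).length : Int) := by
          rw [hlen3, List.length_drop]; push_cast; omega
        rw [show done ++ (todo.take c).reverse ++ todo.drop c
              = (done ++ (todo.take c).reverse) ++ todo.drop c from by
            rw [List.append_assoc]]
        rw [hb1, hb2]
        rw [ih (todo.drop c).length (by rw [List.length_drop]; omega)
              (todo.drop c) (done ++ (todo.take c).reverse) K hK rfl]
        have hR : chunkRev K.toNat todo
            = (todo.take K.toNat).reverse ++ chunkRev K.toNat (todo.drop K.toNat) := by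
          rw [chunkRev, dif_neg (by
            intro hcon
            rcases hcon with hcon | hcon
            · exact h0 hcon
            · omega)]
        rw [hR, hck]
        simp [List.append_assoc]
      · -- short (last) group: everything reversed, range exhausted
        have hck : c = todo.length := by omega
        rw [pyRange_pos_nil _ _ _ (by omega) (by omega), List.foldl_nil]
        have hR : chunkRev K.toNat todo
            = (todo.take K.toNat).reverse ++ chunkRev K.toNat (todo.drop K.toNat) := by
          rw [chunkRev, dif_neg (by
            intro hcon
            rcases hcon with hcon | hcon
            · exact h0 hcon
            · omega)]
        rw [hR]
        have ht : todo.take K.toNat = todo := List.take_of_length_le (by omega)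
        have hd : todo.drop K.toNat = [] := List.drop_eq_nil_of_le (by omega)
        have ht2 : todo.take c = todo := by rw [hck]; exact List.take_length
        have hd2 : todo.drop c = [] := by rw [hck]; exact List.drop_length
        rw [ht, hd, ht2, hd2, chunkRev_nil]
        simp

-- ===== VERDICT (by name: the statement is the Claim_ definition above) =====
theorem reverseInGroups_spec : Claim_equal_reverseInGroups := by
  intro arr N K hdom hpre
  unfold Pre_reverseInGroups at hpre
  unfold Spec_reverseInGroups reverseInGroups reverseInGroups_alt
  simp only []
  rcases hpre with hK | ⟨hKn, hN⟩
  case inr =>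
    -- K ≤ -1 ∧ 0 ≤ N: both programs compute a nonpositive group count and return []
    have h0 : K < 0 := by omega
    have hd := PySem.Int.floordiv_mul_add_mod N K
    have hm := PySem.Int.mod_neg_bounds N h0
    have hqle : PySem.Int.floordiv N K ≤ 0 := by
      by_contra hq
      have h1 : 0 ≤ (PySem.Int.floordiv N K - 1) * (-K) :=
        mul_nonneg (by omega) (by omega)
      have h2 : (PySem.Int.floordiv N K - 1) * (-K)
          = -(PySem.Int.floordiv N K * K) + K := by ring
      omega
    have hsubsA : (if PySem.Int.mod N K ≠ 0 then PySem.Int.floordiv N K + 1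
        else PySem.Int.floordiv N K) ≤ 0 := by
      split_ifs with hmod
      · by_contra h'
        have hq0 : PySem.Int.floordiv N K = 0 := by omega
        rw [hq0, zero_mul, zero_add] at hd
        omega
      · omega
    have hq2 : 0 ≤ PySem.Int.floordiv (-N) K := by
      by_contra hq
      have hd2 := PySem.Int.floordiv_mul_add_mod (-N) K
      have hm2 := PySem.Int.mod_neg_bounds (-N) h0
      have h1 : 0 ≤ (-(PySem.Int.floordiv (-N) K + 1)) * (-K) :=
        mul_nonneg (by omega) (by omega)
      have h2 : (-(PySem.Int.floordiv (-N) K + 1)) * (-K)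
          = PySem.Int.floordiv (-N) K * K + K := by ring
      omega
    have hmax : max (-PySem.Int.floordiv (-N) K) 0 = 0 := by omega
    rw [hmax, zero_mul]
    rw [PySem.List.slice_zero_start, PySem.List.slice_to _ (le_refl (0:Int))]
    simp only [Int.toNat_zero, List.take_zero, List.length_nil, Int.natCast_zero]
    rw [PySem.List.pyRange_one_eq_nil hsubsA, List.foldl_nil]
    rw [show PySem.List.pyRange 0 0 K = [] from by simp [PySem.List.pyRange], List.foldl_nil]
  case inl =>
  rw [subsA_eq N K hK]
  set s := -(PySem.Int.floordiv (-N) K) with hs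
  have hbr : (s - 1) * K < N ∧ N ≤ s * K :=
    (PySem.Int.neg_floordiv_neg_eq_iff_of_pos (show (0:Int) < K by omega)).mp hs.symm
  by_cases hspos : 1 ≤ s
  · -- at least one group
    have hmax : max s 0 = s := by omega
    rw [hmax]
    have hsk : (0:Int) ≤ s * K := mul_nonneg (by omega) (by omega)
    rw [PySem.List.slice_zero_start, PySem.List.slice_to _ hsk]
    set k := K.toNat with hkdef
    have hkk : ((k : Nat) : Int) = K := Int.toNat_of_nonneg (by omega)
    have hkpos : 0 < k := by omega
    have hT : (s * K).toNat = s.toNat * k := by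
      have e : s * K = ((s.toNat * k : Nat) : Int) := by
        push_cast [hkk, Int.toNat_of_nonneg (show (0:Int) ≤ s by omega)]
        ring
      rw [e, Int.toNat_natCast]
    -- A side
    rw [PySem.List.foldl_append_eq_flatMap, List.nil_append]
    rw [PySem.List.pyRange_one 0 s, List.flatMap_map]
    have hfun : (fun (a : Nat) => (PySem.List.slice arr (some (K * (0 + (a : Int))))
            (some (K * (0 + (a : Int)) + K))).reverse)
        = (fun (i : Nat) => ((arr.drop (k * i)).take k).reverse) := by
      funext i
      rw [show K * (0 + (i : Int)) = ((k * i : Nat) : Int) from by push_cast [hkk]; ring]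
      rw [show ((k * i : Nat) : Int) + K = ((k * i + k : Nat) : Int) from by push_cast [hkk]; ring]
      rw [PySem.List.slice_natCast, Nat.add_sub_cancel_left]
    rw [show (s - 0).toNat = s.toNat from by omega, hfun]
    rw [Aside s.toNat k hkpos arr]
    -- B side
    have hB := Bside (arr.take (s * K).toNat).length (arr.take (s * K).toNat) [] K hK rfl
    simp only [List.length_nil, Int.natCast_zero, zero_add, List.nil_append] at hB
    rw [hB, hT]
  · -- no groups: both sides are []
    have hmax : max s 0 = 0 := by omega
    rw [hmax, zero_mul]
    rw [PySem.List.slice_zero_start, PySem.List.slice_to _ (le_refl (0:Int))]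
    simp only [Int.toNat_zero, List.take_zero, List.length_nil, Int.natCast_zero]
    rw [PySem.List.pyRange_one_eq_nil (by omega), List.foldl_nil]
    rw [pyRange_pos_nil _ _ _ (by omega) (le_refl 0), List.foldl_nil]
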